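-- pv_equiv track=rewrite | github.com/aik38/telegram-tarot-bot | bot/utils/tarot_output.py | _compress_blank_lines
-- ===== SOURCE A (Python) =====
-- from typing import Iterable, Sequence
--
-- def _compress_blank_lines(lines: Iterable[str]) -> list[str]:
--     compressed: list[str] = []
--     for line in lines:
--         if line == "":
--             if compressed and compressed[-1] == "":
--                 continue
--             compressed.append("")
--             continue
--         compressed.append(line)
--
--     while compressed and compressed[0] == "":
--         compressed.pop(0)
--     while compressed and compressed[-1] == "":
--         compressed.pop()
--     return compressed
-- ===== SOURCE B (Python) =====
-- def _compress_blank_lines(lines):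
--     result = []
--     pending_blank = False
--     for line in lines:
--         if line == "":
--             pending_blank = True
--         else:
--             if pending_blank and result:
--                 result.append("")
--             result.append(line)
--             pending_blank = False
--     return result
-- ===== Notes on version B (the rewrite author's own statement) =====
-- stated objective: simpler
-- what changed: Replaced the build-then-trim three-phase version (append with last-element peek, then two while loops popping leading and trailing blanks) by a single forward pass with a pending_blank flag that emits a blank only between two non-blank blocks, so no trim phase exists at all.
import Mathlib
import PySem

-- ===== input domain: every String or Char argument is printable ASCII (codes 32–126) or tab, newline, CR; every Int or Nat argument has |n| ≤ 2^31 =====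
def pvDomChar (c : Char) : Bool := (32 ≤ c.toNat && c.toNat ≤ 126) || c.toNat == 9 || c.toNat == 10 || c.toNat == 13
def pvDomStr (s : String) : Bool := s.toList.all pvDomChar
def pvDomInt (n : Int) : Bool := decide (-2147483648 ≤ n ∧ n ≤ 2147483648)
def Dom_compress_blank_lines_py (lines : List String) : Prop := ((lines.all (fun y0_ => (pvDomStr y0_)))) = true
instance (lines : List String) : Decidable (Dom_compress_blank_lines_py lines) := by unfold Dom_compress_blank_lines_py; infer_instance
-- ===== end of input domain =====

-- B replaces A's build-then-trim (append with last-element peek plus two while loops popping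
-- leading/trailing blanks) by one forward pass with a pending-blank flag; objective: simpler.

-- ===== PORT A =====
-- the for-loop accumulating `compressed`
def pvALoop (c : List String) (lines : List String) : List String :=
  lines.foldl (fun c line =>
    if line = "" then
      (if c.getLast? = some "" then c else c ++ [""])
    else c ++ [line]) c

-- `while compressed and compressed[0] == "": compressed.pop(0)`
def pvDropLead : List String → List String
  | [] => []
  | x :: rest => if x = "" then pvDropLead rest else x :: rest

-- `while compressed and compressed[-1] == "": compressed.pop()`  (structural recursion for the pop-last loop)
def pvDropTrail : List String → List String
  | [] => []
  | x :: rest =>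
    let r := pvDropTrail rest
    if r = [] ∧ x = "" then [] else x :: r

def compress_blank_lines_py (lines : List String) : List String :=
  pvDropTrail (pvDropLead (pvALoop [] lines))

-- ===== PORT B =====
def pvBLoop (st : List String × Bool) (lines : List String) : List String × Bool :=
  lines.foldl (fun st line =>
    if line = "" then (st.1, true)
    else ((st.1 ++ (if st.2 ∧ st.1 ≠ [] then [""] else [])) ++ [line], false)) st

def compress_blank_lines_py_alt (lines : List String) : List String :=
  (pvBLoop ([], false) lines).1

-- ===== PRECONDITION & SPEC =====
def Spec_compress_blank_lines_py (lines : List String) (out : List String) : Prop := out = compress_blank_lines_py_alt lines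
instance (lines : List String) (out : List String) : Decidable (Spec_compress_blank_lines_py lines out) := by unfold Spec_compress_blank_lines_py; infer_instance

-- ===== CLAIM (what is proved, stated in full; the proofs are below) =====
def Claim_equal_compress_blank_lines_py : Prop := ∀ (lines : List String), Dom_compress_blank_lines_py lines → Spec_compress_blank_lines_py lines (compress_blank_lines_py lines)

-- ===== LEMMAS AND PROOFS =====

theorem pvDropLead_append_of_ne (xs ys : List String) (h : pvDropLead xs ≠ []) :
    pvDropLead (xs ++ ys) = pvDropLead xs ++ ys := by
  induction xs with
  | nil => simp [pvDropLead] at h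
  | cons x rest ih =>
    by_cases hx : x = ""
    · simp only [pvDropLead, if_pos hx] at h
      simpa [pvDropLead, hx] using ih h
    · simp [pvDropLead, hx]

theorem pvDropLead_append_of_nil (xs ys : List String) (h : pvDropLead xs = []) :
    pvDropLead (xs ++ ys) = pvDropLead ys := by
  induction xs with
  | nil => simp
  | cons x rest ih =>
    by_cases hx : x = "" <;> simp [pvDropLead, hx] at h ⊢
    · exact ih h

theorem pvDropLead_ne_nil (xs : List String) (hne : xs ≠ []) (hl : xs.getLast? ≠ some "") :
    pvDropLead xs ≠ [] := by
  induction xs with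
  | nil => exact absurd rfl hne
  | cons x rest ih =>
    by_cases hx : x = ""
    · subst hx
      simp [pvDropLead]
      rcases rest with _ | ⟨y, rs⟩
      · simp [List.getLast?] at hl
      · exact ih (by simp) (by simpa [List.getLast?_cons_cons] using hl)
    · simp [pvDropLead, hx]

theorem pvDropTrail_cons (x : String) (l : List String) :
    pvDropTrail (x :: l) = if pvDropTrail l = [] ∧ x = "" then [] else x :: pvDropTrail l := rfl

theorem pvDropTrail_of_last_ne (xs : List String) (hl : xs.getLast? ≠ some "") :
    pvDropTrail xs = xs := by
  induction xs with
  | nil => rfl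
  | cons x rest ih =>
    rcases rest with _ | ⟨y, rs⟩
    · simp [List.getLast?] at hl
      simp [pvDropTrail, hl]
    · have h2 : (y :: rs).getLast? ≠ some "" := by
        simpa [List.getLast?_cons_cons] using hl
      have hr := ih h2
      rw [pvDropTrail_cons, hr]
      simp

theorem pvDropTrail_append_blank (xs : List String) :
    pvDropTrail (xs ++ [""]) = pvDropTrail xs := by
  induction xs with
  | nil => simp [pvDropTrail]
  | cons x rest ih => simp [pvDropTrail, ih]

-- main invariant lemma: relates A's accumulator to B's (result, pending_blank) state
theorem pv_main (lines : List String) :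
    ∀ (c res : List String) (pending : Bool),
    pvDropLead c = res ++ (if pending = true ∧ res ≠ [] then [""] else []) →
    (pending = true ↔ c.getLast? = some "") →
    res.getLast? ≠ some "" →
    pvDropTrail (pvDropLead (pvALoop c lines)) = (pvBLoop (res, pending) lines).1 := by
  induction lines with
  | nil =>
    intro c res pending h1 _ h3
    simp [pvALoop, pvBLoop, h1]
    by_cases hp : pending = true ∧ res ≠ []
    · simp [hp, pvDropTrail_append_blank, pvDropTrail_of_last_ne res h3]
    · simp [hp, pvDropTrail_of_last_ne res h3]
  | cons line rest ih =>
    intro c res pending h1 h2 h3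
    by_cases hl : line = ""
    · subst hl
      by_cases hp : pending = true
      · -- A keeps c, B keeps res with pending true
        have hlast : c.getLast? = some "" := h2.mp hp
        simp only [pvALoop, pvBLoop, List.foldl_cons, hlast]
        exact ih c res true (by simpa [hp] using h1) (by simp [hlast]) h3
      · have hplast : c.getLast? ≠ some "" := fun h => hp (h2.mpr h)
        have hb : pending = false := by simpa using hp
        have hres : pvDropLead c = res := by simpa [hp] using h1
        simp only [pvALoop, pvBLoop, List.foldl_cons, if_neg hplast]
        rcases eq_or_ne c [] with hc | hc
        · subst hc
          have : res = [] := by simpa [pvDropLead] using hres.symm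
          subst this
          exact ih [""] [] true (by simp [pvDropLead]) (by simp [List.getLast?]) (by simp)
        · have hne : pvDropLead c ≠ [] := pvDropLead_ne_nil c hc hplast
          have hresne : res ≠ [] := hres ▸ hne
          refine ih (c ++ [""]) res true ?_ (by simp) h3
          rw [pvDropLead_append_of_ne c [""] hne, hres]
          simp [hresne]
    · -- line ≠ ""
      have hnew : pvDropLead (c ++ [line])
          = (res ++ (if pending = true ∧ res ≠ [] then [""] else [])) ++ [line] := by
        rcases eq_or_ne (pvDropLead c) [] with hdc | hdc
        · have hz : res ++ (if pending = true ∧ res ≠ [] then [""] else []) = [] := by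
            rw [← h1]; exact hdc
          rcases List.append_eq_nil_iff.mp hz with ⟨hr, hr2⟩
          rw [pvDropLead_append_of_nil c [line] hdc]
          simp [pvDropLead, hl, hr]
        · rw [pvDropLead_append_of_ne c [line] hdc, h1]
      have hA : pvALoop c (line :: rest) = pvALoop (c ++ [line]) rest := by
        simp [pvALoop, hl]
      have hB : pvBLoop (res, pending) (line :: rest)
          = pvBLoop ((res ++ (if pending = true ∧ res ≠ [] then [""] else [])) ++ [line], false) rest := by
        simp only [pvBLoop, List.foldl_cons, if_neg hl]
      rw [hA, hB]
      refine ih _ _ false (by simpa using hnew) ?_ ?_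
      · simp [hl]
      · simp [hl]

-- ===== VERDICT (by name: the statement is the Claim_ definition above) =====
theorem compress_blank_lines_py_spec : Claim_equal_compress_blank_lines_py := by
  intro lines _
  show compress_blank_lines_py lines = compress_blank_lines_py_alt lines
  unfold compress_blank_lines_py compress_blank_lines_py_alt
  exact pv_main lines [] [] false (by simp [pvDropLead]) (by simp) (by simp)
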